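-- pv_equiv track=rewrite | github.com/rshopa/data_sci_introduction | assignment1/code/term_sentiment.py | scores_sum
-- ===== SOURCE A (Python) =====
-- def scores_sum(ini_list,scores_dict):
--
--                 # here is a LIST, NOT STRING(!) on the input
--
--         Sum=0
--         scores_l=list(scores_dict.keys())
--
--                         # create a list from AFINN-111 dict
--
--         for z in ini_list:
--                 if z in scores_l:
--                         Sum += scores_dict[z]
--
--         out_list = [x for x in ini_list if x not in scores_l]
--
--                         #remove 'em from tweet
--
--         return out_list, Sum
-- ===== SOURCE B (Python) =====
-- def scores_sum(ini_list, scores_dict):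
--     # Count each term's multiplicity once, then compute the total by
--     # iterating the DICTIONARY's items weighted by those counts.
--     counts = {}
--     for z in ini_list:
--         counts[z] = counts.get(z, 0) + 1
--     Sum = 0
--     for term, score in scores_dict.items():
--         Sum += score * counts.get(term, 0)
--     out_list = [x for x in ini_list if x not in scores_dict]
--     return out_list, Sum
-- ===== Notes on version B (the rewrite author's own statement) =====
-- stated objective: faster
-- what changed: B replaces A's per-term scan of the key list (membership test and lookup for every term, plus a second comprehension over the same key list) by a counting algorithm: it builds a multiplicity counter of ini_list once, computes the sum by iterating over scores_dict's items weighted by those counts (no sum loop over ini_list at all), and filters the unmatched terms with the dict's own membership.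
import Mathlib
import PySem

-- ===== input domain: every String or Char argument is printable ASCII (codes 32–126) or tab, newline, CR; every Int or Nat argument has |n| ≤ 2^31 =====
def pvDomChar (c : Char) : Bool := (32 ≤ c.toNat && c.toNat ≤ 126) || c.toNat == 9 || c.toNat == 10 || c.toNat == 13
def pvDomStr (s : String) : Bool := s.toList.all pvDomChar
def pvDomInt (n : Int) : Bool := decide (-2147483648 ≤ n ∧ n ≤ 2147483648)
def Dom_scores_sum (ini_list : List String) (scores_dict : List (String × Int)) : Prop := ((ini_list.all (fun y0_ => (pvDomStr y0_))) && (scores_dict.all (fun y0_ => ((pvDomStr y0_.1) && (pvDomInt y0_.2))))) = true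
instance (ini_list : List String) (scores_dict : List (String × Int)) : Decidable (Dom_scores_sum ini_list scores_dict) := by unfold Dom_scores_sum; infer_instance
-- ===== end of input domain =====

-- B is a counting algorithm: one multiplicity counter over ini_list, then the sum is taken
-- over the DICTIONARY's items weighted by counts (instead of A's per-term scans of the key list).

-- ===== PORT A =====
def scores_sum (ini_list : List String) (scores_dict : List (String × Int)) : List String × Int :=
  let d := PySem.Dict.ofList scores_dict
  let scores_l := d.keys                      -- list(scores_dict.keys())
  -- for z in ini_list: if z in scores_l: Sum += scores_dict[z]
  -- (the branch guarantees the key is present, so getD 0 is exactly scores_dict[z])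
  let Sum := ini_list.foldl (fun S z => if z ∈ scores_l then S + d.getD z 0 else S) 0
  let out_list := ini_list.filter (fun x => decide (x ∉ scores_l))
  (out_list, Sum)

-- ===== PORT B =====
def scores_sum_alt (ini_list : List String) (scores_dict : List (String × Int)) : List String × Int :=
  -- counts = {}; for z in ini_list: counts[z] = counts.get(z, 0) + 1
  let counts := ini_list.foldl (fun (c : PySem.Dict String Int) z => c.insert z (c.getD z 0 + 1)) PySem.Dict.empty
  let d := PySem.Dict.ofList scores_dict
  -- for term, score in scores_dict.items(): Sum += score * counts.get(term, 0)
  let Sum := d.items.foldl (fun S p => S + p.2 * counts.getD p.1 0) 0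
  let out_list := ini_list.filter (fun x => !(d.contains x))
  (out_list, Sum)

-- ===== PRECONDITION & SPEC =====
def Spec_scores_sum (ini_list : List String) (scores_dict : List (String × Int)) (out : List String × Int) : Prop := out = scores_sum_alt ini_list scores_dict
instance (ini_list : List String) (scores_dict : List (String × Int)) (out : List String × Int) : Decidable (Spec_scores_sum ini_list scores_dict out) := by unfold Spec_scores_sum; infer_instance

-- ===== CLAIM =====
def Claim_equal_scores_sum : Prop := ∀ (ini_list : List String) (scores_dict : List (String × Int)), Dom_scores_sum ini_list scores_dict → Spec_scores_sum ini_list scores_dict (scores_sum ini_list scores_dict)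

-- ===== LEMMAS AND PROOFS =====

-- sum of an indicator map over a duplicate-free list
lemma sum_map_ite_self {f : String → Int} (ks : List String) (hnd : ks.Nodup) (a : String) :
    (ks.map (fun k => if k = a then f k else 0)).sum = if a ∈ ks then f a else 0 := by
  induction ks with
  | nil => simp
  | cons k rest ih =>
    rcases List.nodup_cons.mp hnd with ⟨hk, hrest⟩
    by_cases h : k = a
    · subst h
      simp [List.map_cons, hk, ih hrest]
    · simp [List.map_cons, h, ih hrest, Ne.symm h]

-- the per-element score A adds, summed over d.items as an indicator
lemma items_indicator_sum (d : PySem.Dict String Int) (hnd : d.keys.Nodup) (a : String) :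
    (d.items.map (fun p => if p.1 = a then p.2 else 0)).sum = d.getD a 0 := by
  rw [PySem.Dict.items_eq_map_keys d hnd 0, List.map_map]
  have : ((fun p : String × Int => if p.1 = a then p.2 else 0) ∘ fun k => (k, d.getD k 0))
        = fun k => if k = a then d.getD k 0 else 0 := rfl
  rw [this, sum_map_ite_self d.keys hnd a]
  by_cases h : a ∈ d.keys
  · simp [h]
  · simp [h]
    exact (PySem.Dict.getD_of_not_contains d 0 (by
      simpa [PySem.Dict.contains_eq_decide_mem_keys] using h)).symm

-- the weighted-sum identity: summing getD over ini equals the count-weighted sum over items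
lemma sum_identity (d : PySem.Dict String Int) (hnd : d.keys.Nodup) (ini : List String) :
    (ini.map (fun z => d.getD z 0)).sum
    = (d.items.map (fun p => p.2 * (ini.count p.1 : Int))).sum := by
  induction ini with
  | nil => simp
  | cons a rest ih =>
    have hsplit : (d.items.map (fun p => p.2 * (((a :: rest).count p.1 : Nat) : Int))).sum
        = (d.items.map (fun p => p.2 * ((rest.count p.1 : Nat) : Int))).sum
          + (d.items.map (fun p => if p.1 = a then p.2 else 0)).sum := by
      rw [← List.sum_map_add]
      congr 1
      apply List.map_congr_left
      intro p _
      by_cases h : p.1 = a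
      · simp [h, mul_add]
      · simp [h, Ne.symm h]
    rw [List.map_cons, List.sum_cons, hsplit, items_indicator_sum d hnd a, ih]
    ring

-- A's sum loop, with the vacuous branch removed, as a sum of a map
lemma foldA_eq (d : PySem.Dict String Int) (ini : List String) : ∀ S : Int,
    ini.foldl (fun S z => if z ∈ d.keys then S + d.getD z 0 else S) S
    = S + (ini.map (fun z => d.getD z 0)).sum := by
  induction ini with
  | nil => simp
  | cons z rest ih =>
    intro S
    by_cases h : z ∈ d.keys
    · simp [h, ih, add_assoc]
    · have h0 : d.getD z 0 = 0 :=
        PySem.Dict.getD_of_not_contains d 0 (by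
          simpa [PySem.Dict.contains_eq_decide_mem_keys] using h)
      simp [h, ih, h0]

-- B's sum loop as a sum of a map
lemma foldB_eq (l : List (String × Int)) (f : String × Int → Int) : ∀ S : Int,
    l.foldl (fun S p => S + f p) S = S + (l.map f).sum := by
  induction l with
  | nil => simp
  | cons p rest ih =>
    intro S
    simp [ih, add_assoc]

theorem scores_sum_spec : Claim_equal_scores_sum := by
  intro ini_list scores_dict _
  show scores_sum ini_list scores_dict = scores_sum_alt ini_list scores_dict
  unfold scores_sum scores_sum_alt
  have hnd := PySem.Dict.nodup_keys_ofList (κ := String) (ν := Int) scores_dict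
  refine Prod.ext ?_ ?_
  · -- out_list: x ∉ keys ↔ ¬ contains
    simp [PySem.Dict.contains_eq_decide_mem_keys]
  · -- Sum
    simp only
    rw [foldA_eq, foldB_eq (PySem.Dict.ofList scores_dict).items
          (fun p => p.2 * ((ini_list.foldl (fun (c : PySem.Dict String Int) z => c.insert z (c.getD z 0 + 1)) PySem.Dict.empty).getD p.1 0)),
        zero_add, zero_add, sum_identity _ hnd ini_list]
    congr 1
    apply List.map_congr_left
    intro p _
    rw [PySem.Dict.foldl_insert_getD_add_one_eq_counter, PySem.Dict.getD_counter]
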